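-- pv_equiv track=rewrite | github.com/ClaudyFlow/rust_ime | test_match.py | matches_segments
-- ===== SOURCE A (Python) =====
-- def matches_segments(key, segments):
--     current_key = key
--     for i, seg in enumerate(segments):
--         if not current_key: return False
--         if i == len(segments) - 1:
--             return current_key.startswith(seg)
--
--         found = False
--         # 模拟 Processor 的音节切分逻辑
--         for length in range(len(current_key), 0, -1):
--             syl = current_key[:length]
--             if syl in ["zao", "zai", "shang", "ang", "sh"]: # 模拟 syllables.contains
--                 if syl.startswith(seg):
--                     current_key = current_key[length:]
--                     found = True
--                     break
--         if not found: return False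
--     return True
-- ===== SOURCE B (Python) =====
-- # Same matching, but the inner longest-prefix scan over all key lengths is replaced
-- # by a scan over the fixed syllable table (sorted by length descending), and the
-- # outer segment loop by structural recursion on the segment list.
-- SYLLABLES = ("shang", "zao", "zai", "ang", "sh")  # longest first
--
-- def matches_segments(key, segments):
--     if not segments:
--         return True
--     if not key:
--         return False
--     seg = segments[0]
--     if len(segments) == 1:
--         return key.startswith(seg)
--     for s in SYLLABLES:
--         if key.startswith(s) and s.startswith(seg):
--             return matches_segments(key[len(s):], segments[1:])
--     return False
-- ===== Notes on version B (the rewrite author's own statement) =====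
-- stated objective: faster
-- what changed: The inner longest-first scan over every prefix length of the remaining key is replaced by a single pass over the fixed syllable table sorted by length descending, and the outer indexed segment loop by structural recursion on the segment list.
import Mathlib
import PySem

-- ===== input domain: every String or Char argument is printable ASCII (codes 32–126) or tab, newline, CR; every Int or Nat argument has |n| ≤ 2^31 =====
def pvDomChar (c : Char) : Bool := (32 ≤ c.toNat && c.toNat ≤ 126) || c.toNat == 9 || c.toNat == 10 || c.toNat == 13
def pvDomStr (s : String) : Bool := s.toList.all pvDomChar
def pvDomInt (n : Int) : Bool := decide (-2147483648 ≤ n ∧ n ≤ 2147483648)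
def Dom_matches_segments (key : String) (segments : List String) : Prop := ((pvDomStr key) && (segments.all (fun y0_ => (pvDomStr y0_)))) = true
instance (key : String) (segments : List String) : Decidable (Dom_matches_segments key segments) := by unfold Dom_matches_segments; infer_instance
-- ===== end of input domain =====

-- B replaces A's per-length prefix scan by one pass over the fixed syllable table
-- (longest first) and the indexed segment loop by structural recursion (objective: faster, measured).

-- ===== PORT A =====
-- the string constants ["zao", "zai", "shang", "ang", "sh"] as lists of code points
def sylA : List (List Char) :=
  [['z','a','o'], ['z','a','i'], ['s','h','a','n','g'], ['a','n','g'], ['s','h']]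

-- the inner `for length in range(len(current_key), 0, -1)` loop: counts L+1 = length
-- down from len(current_key); returns the consumed key (some) on break, none if no break
def innerA (ck seg : List Char) : Nat → Option (List Char)
  | 0 => none
  | L + 1 =>
      let syl := PySem.List.slice ck none (some ((L + 1 : Nat) : Int))  -- current_key[:length]
      if syl ∈ sylA then
        if PySem.Chars.startswith syl seg then
          some (PySem.List.slice ck (some ((L + 1 : Nat) : Int)) none)  -- current_key[length:]
        else innerA ck seg L
      else innerA ck seg L

-- `for i, seg in enumerate(segments)` with n = len(segments)
def loopA (n : Nat) : Nat → List Char → List String → Bool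
  | _, _, [] => true
  | i, ck, seg :: rest =>
      if ck.isEmpty then false
      else if i = n - 1 then PySem.Chars.startswith ck seg.toList
      else
        match innerA ck seg.toList ck.length with
        | some ck' => loopA n (i + 1) ck' rest
        | none => false

def matches_segments (key : String) (segments : List String) : Bool :=
  loopA segments.length 0 key.toList segments

-- ===== PORT B =====
-- SYLLABLES = ("shang", "zao", "zai", "ang", "sh"), longest first
def sylB : List (List Char) :=
  [['s','h','a','n','g'], ['z','a','o'], ['z','a','i'], ['a','n','g'], ['s','h']]

-- the `for s in SYLLABLES` loop: first s with key.startswith(s) and s.startswith(seg)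
def pickB (k seg : List Char) : List (List Char) → Option (List Char)
  | [] => none
  | s :: rest =>
      if PySem.Chars.startswith k s && PySem.Chars.startswith s seg then
        some (k.drop s.length)  -- key[len(s):]
      else pickB k seg rest

def altGo : List Char → List String → Bool
  | _, [] => true
  | k, seg :: rest =>
      if k.isEmpty then false
      else if rest.isEmpty then PySem.Chars.startswith k seg.toList  -- len(segments) == 1
      else
        match pickB k seg.toList sylB with
        | some k' => altGo k' rest
        | none => false

def matches_segments_alt (key : String) (segments : List String) : Bool :=
  altGo key.toList segments

-- ===== PRECONDITION & SPEC =====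
def Spec_matches_segments (key : String) (segments : List String) (out : Bool) : Prop := out = matches_segments_alt key segments
instance (key : String) (segments : List String) (out : Bool) : Decidable (Spec_matches_segments key segments out) := by unfold Spec_matches_segments; infer_instance

-- ===== CLAIM (what is proved, stated in full; the proofs are below) =====
def Claim_equal_matches_segments : Prop := ∀ (key : String) (segments : List String), Dom_matches_segments key segments → Spec_matches_segments key segments (matches_segments key segments)

-- ===== LEMMAS AND PROOFS =====

theorem sw_eq (k s : List Char) : PySem.Chars.startswith k s = decide (k.take s.length = s) := by
  apply Bool.eq_iff_iff.mpr
  rw [PySem.Chars.startswith_iff, List.prefix_iff_eq_take, decide_eq_true_eq]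
  exact eq_comm

theorem take_ne_of_len (ck s : List Char) (n : Nat) (hn : n ≤ ck.length) (hl : s.length ≠ n) :
    ck.take n ≠ s := by
  intro h; apply hl; rw [← h, List.length_take]; omega

theorem innerA_succ (ck seg : List Char) (L : Nat) :
    innerA ck seg (L + 1) =
      (if ck.take (L + 1) ∈ sylA then
        if PySem.Chars.startswith (ck.take (L + 1)) seg then some (ck.drop (L + 1))
        else innerA ck seg L
      else innerA ck seg L) := by
  simp only [innerA]
  rw [PySem.List.slice_to_natCast, PySem.List.slice_from_natCast]

theorem inner_filter (ck seg : List Char) (L : Nat) (hL : L ≤ ck.length) :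
    innerA ck seg L = pickB ck seg (sylB.filter (fun s => decide (s.length ≤ L))) := by
  induction L with
  | zero => rfl
  | succ L ih =>
    have ih := ih (by omega)
    rw [innerA_succ]
    by_cases h5 : L + 1 = 5
    · rw [h5]
      have hL4 : L = 4 := by omega
      subst hL4
      rw [show sylB.filter (fun s => decide (s.length ≤ 5)) = sylB from by decide]
      rw [show sylB.filter (fun s => decide (s.length ≤ 4)) =
            [['z','a','o'], ['z','a','i'], ['a','n','g'], ['s','h']] from by decide] at ih
      by_cases hs : ck.take 5 = ['s','h','a','n','g']
      · have h3 : ck.take 3 = ['s','h','a'] := by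
          rw [show ck.take 3 = (ck.take 5).take 3 from by rw [List.take_take]; norm_num, hs]; rfl
        have h2 : ck.take 2 = ['s','h'] := by
          rw [show ck.take 2 = (ck.take 5).take 2 from by rw [List.take_take]; norm_num, hs]; rfl
        simp [sylA, sylB, pickB, sw_eq, hs, h3, h2, ih]
      · have hns : ck.take 5 ∉ sylA := by
          simp only [sylA, List.mem_cons, List.not_mem_nil, or_false]
          push Not
          exact ⟨take_ne_of_len ck _ 5 (by omega) (by decide),
                 take_ne_of_len ck _ 5 (by omega) (by decide), hs,
                 take_ne_of_len ck _ 5 (by omega) (by decide),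
                 take_ne_of_len ck _ 5 (by omega) (by decide)⟩
        rw [if_neg hns, ih]
        simp [sylB, pickB, sw_eq, hs]
    · by_cases h3 : L + 1 = 3
      · rw [h3]
        have hL2 : L = 2 := by omega
        subst hL2
        rw [show sylB.filter (fun s => decide (s.length ≤ 3)) =
              [['z','a','o'], ['z','a','i'], ['a','n','g'], ['s','h']] from by decide]
        rw [show sylB.filter (fun s => decide (s.length ≤ 2)) = [['s','h']] from by decide] at ih
        have htt : ck.take 2 = (ck.take 3).take 2 := by rw [List.take_take]; norm_num
        by_cases ha : ck.take 3 = ['z','a','o']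
        · have h2 : ck.take 2 = ['z','a'] := by rw [htt, ha]; rfl
          simp [sylA, pickB, sw_eq, ha, h2, ih]
        · by_cases hb : ck.take 3 = ['z','a','i']
          · have h2 : ck.take 2 = ['z','a'] := by rw [htt, hb]; rfl
            simp [sylA, pickB, sw_eq, hb, h2, ih]
          · by_cases hc : ck.take 3 = ['a','n','g']
            · have h2 : ck.take 2 = ['a','n'] := by rw [htt, hc]; rfl
              simp [sylA, pickB, sw_eq, hc, h2, ih]
            · have hns : ck.take 3 ∉ sylA := by
                simp only [sylA, List.mem_cons, List.not_mem_nil, or_false]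
                push Not
                exact ⟨ha, hb, take_ne_of_len ck _ 3 (by omega) (by decide), hc,
                       take_ne_of_len ck _ 3 (by omega) (by decide)⟩
              rw [if_neg hns, ih]
              simp [pickB, sw_eq, ha, hb, hc]
      · by_cases h2 : L + 1 = 2
        · rw [h2]
          have hL1 : L = 1 := by omega
          subst hL1
          rw [show sylB.filter (fun s => decide (s.length ≤ 2)) = [['s','h']] from by decide]
          rw [show sylB.filter (fun s => decide (s.length ≤ 1)) = ([] : List (List Char)) from by decide] at ih
          by_cases hs : ck.take 2 = ['s','h']
          · simp [sylA, pickB, sw_eq, hs, ih]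
          · have hns : ck.take 2 ∉ sylA := by
              simp only [sylA, List.mem_cons, List.not_mem_nil, or_false]
              push Not
              exact ⟨take_ne_of_len ck _ 2 (by omega) (by decide),
                     take_ne_of_len ck _ 2 (by omega) (by decide),
                     take_ne_of_len ck _ 2 (by omega) (by decide),
                     take_ne_of_len ck _ 2 (by omega) (by decide), hs⟩
            rw [if_neg hns, ih]
            simp [pickB, sw_eq, hs]
        · -- no syllable has length L+1: the test fails and the filter is unchanged
          have hns : ck.take (L + 1) ∉ sylA := by
            simp only [sylA, List.mem_cons, List.not_mem_nil, or_false]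
            push Not
            exact ⟨take_ne_of_len ck _ _ hL (by simp; omega),
                   take_ne_of_len ck _ _ hL (by simp; omega),
                   take_ne_of_len ck _ _ hL (by simp; omega),
                   take_ne_of_len ck _ _ hL (by simp; omega),
                   take_ne_of_len ck _ _ hL (by simp; omega)⟩
          rw [if_neg hns, ih]
          congr 1
          apply List.filter_congr
          intro s hs
          have hslen : s.length ≠ L + 1 := by
            simp only [sylB] at hs
            fin_cases hs <;> simp <;> omega
          exact decide_eq_decide.mpr (by omega)

theorem pickB_filter (k seg : List Char) : ∀ l : List (List Char),
    pickB k seg (l.filter (fun s => decide (s.length ≤ k.length))) = pickB k seg l := by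
  intro l
  induction l with
  | nil => rfl
  | cons s rest ih =>
    by_cases h : s.length ≤ k.length
    · simp only [List.filter_cons, decide_eq_true_eq, if_pos h, pickB, ih]
    · have hsw : PySem.Chars.startswith k s = false := by
        rw [sw_eq, decide_eq_false_iff_not]
        intro hEq
        have := congrArg List.length hEq
        rw [List.length_take] at this
        omega
      simp [h, pickB, hsw, ih]

theorem inner_eq (ck seg : List Char) : innerA ck seg ck.length = pickB ck seg sylB := by
  rw [inner_filter ck seg ck.length le_rfl, pickB_filter]

theorem loop_eq (segs : List String) : ∀ (i n : Nat) (ck : List Char),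
    n = i + segs.length → loopA n i ck segs = altGo ck segs := by
  induction segs with
  | nil => intro i n ck _; rfl
  | cons seg rest ih =>
    intro i n ck h
    by_cases hk : ck.isEmpty
    · cases rest <;> simp [loopA, altGo, hk]
    · cases rest with
      | nil =>
        have hi : i = n - 1 := by simp at h; omega
        simp [loopA, altGo, hk, hi]
      | cons r rs =>
        have hi : ¬ i = n - 1 := by simp at h; omega
        rw [show loopA n i ck (seg :: r :: rs) =
              (match innerA ck seg.toList ck.length with
              | some ck' => loopA n (i + 1) ck' (r :: rs)
              | none => false) from by simp [loopA, hk, hi],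
            show altGo ck (seg :: r :: rs) =
              (match pickB ck seg.toList sylB with
              | some k' => altGo k' (r :: rs)
              | none => false) from by simp [altGo, hk]]
        rw [inner_eq]
        cases hp : pickB ck seg.toList sylB with
        | none => rfl
        | some ck' => exact ih (i + 1) n ck' (by simp at h ⊢; omega)

-- ===== VERDICT (by name: the statement is the Claim_ definition above) =====
theorem matches_segments_spec : Claim_equal_matches_segments := by
  intro key segments _
  unfold Spec_matches_segments matches_segments matches_segments_alt
  exact loop_eq segments 0 segments.length key.toList (by simp)
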